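-- pv_equiv track=rewrite | github.com/TanKucukhas/note-organizer | analyze_note.py | categorize_links
-- ===== SOURCE A (Python) =====
-- def categorize_links(links):
--     """Categorize links by type."""
--     categorized = {
--         'youtube': [],
--         'social_media': [],
--         'documentation': [],
--         'other': []
--     }
--
--     for link in links:
--         if 'youtube.com' in link or 'youtu.be' in link:
--             categorized['youtube'].append(link)
--         elif any(site in link for site in ['instagram.com', 'facebook.com', 'twitter.com', 'tiktok.com']):
--             categorized['social_media'].append(link)
--         elif any(site in link for site in ['github.com', 'docs.', 'documentation']):
--             categorized['documentation'].append(link)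
--         else:
--             categorized['other'].append(link)
--
--     return categorized
-- ===== SOURCE B (Python) =====
-- def categorize_links(links):
--     """Categorize links by type."""
--     def hit(link, kws):
--         return any(kw in link for kw in kws)
--     yt_kws = ['youtube.com', 'youtu.be']
--     sm_kws = ['instagram.com', 'facebook.com', 'twitter.com', 'tiktok.com']
--     doc_kws = ['github.com', 'docs.', 'documentation']
--     youtube = [l for l in links if hit(l, yt_kws)]
--     rest = [l for l in links if not hit(l, yt_kws)]
--     social_media = [l for l in rest if hit(l, sm_kws)]
--     rest = [l for l in rest if not hit(l, sm_kws)]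
--     documentation = [l for l in rest if hit(l, doc_kws)]
--     other = [l for l in rest if not hit(l, doc_kws)]
--     return {
--         'youtube': youtube,
--         'social_media': social_media,
--         'documentation': documentation,
--         'other': other,
--     }
-- ===== Notes on version B (the rewrite author's own statement) =====
-- stated objective: alternative
-- what changed: Replaces A's single pass that mutates four dict buckets per link with staged filter passes: each bucket is a list comprehension over the links remaining after the previous categories were filtered out, and the dict is built once at the end.
import Mathlib
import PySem

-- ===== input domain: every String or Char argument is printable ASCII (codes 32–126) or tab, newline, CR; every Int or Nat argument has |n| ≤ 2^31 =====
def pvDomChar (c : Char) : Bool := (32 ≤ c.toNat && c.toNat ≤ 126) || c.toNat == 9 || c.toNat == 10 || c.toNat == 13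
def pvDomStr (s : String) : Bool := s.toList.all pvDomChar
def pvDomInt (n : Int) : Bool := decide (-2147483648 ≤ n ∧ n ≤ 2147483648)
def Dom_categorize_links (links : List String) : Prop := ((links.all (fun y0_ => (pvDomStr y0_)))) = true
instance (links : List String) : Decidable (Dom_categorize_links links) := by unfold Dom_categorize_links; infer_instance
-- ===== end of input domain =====

-- B replaces A's single mutating pass over four dict buckets by staged filter passes that
-- build each bucket independently from the links left over by the previous categories;
-- objective: alternative decomposition, same cost.

-- ===== PORT A =====
def categorize_links (links : List String) : List (String × List String) :=
  let categorized : PySem.Dict String (List String) :=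
    ((((PySem.Dict.empty).insert "youtube" []).insert "social_media" []).insert
        "documentation" []).insert "other" []
  (links.foldl (fun d link =>
    if PySem.Str.isIn "youtube.com" link || PySem.Str.isIn "youtu.be" link then
      d.modify "youtube" [] (fun l => l ++ [link])
    else if ["instagram.com", "facebook.com", "twitter.com", "tiktok.com"].any
        (fun site => PySem.Str.isIn site link) then
      d.modify "social_media" [] (fun l => l ++ [link])
    else if ["github.com", "docs.", "documentation"].any
        (fun site => PySem.Str.isIn site link) then
      d.modify "documentation" [] (fun l => l ++ [link])
    else
      d.modify "other" [] (fun l => l ++ [link])) categorized).items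

-- ===== PORT B =====
-- helper 'hit' of Source B
def pvHit (link : String) (kws : List String) : Bool :=
  kws.any (fun kw => PySem.Str.isIn kw link)

def categorize_links_alt (links : List String) : List (String × List String) :=
  let yt_kws := ["youtube.com", "youtu.be"]
  let sm_kws := ["instagram.com", "facebook.com", "twitter.com", "tiktok.com"]
  let doc_kws := ["github.com", "docs.", "documentation"]
  let youtube := links.filter (fun l => pvHit l yt_kws)
  let rest := links.filter (fun l => !pvHit l yt_kws)
  let social_media := rest.filter (fun l => pvHit l sm_kws)
  let rest2 := rest.filter (fun l => !pvHit l sm_kws)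
  let documentation := rest2.filter (fun l => pvHit l doc_kws)
  let other := rest2.filter (fun l => !pvHit l doc_kws)
  [("youtube", youtube), ("social_media", social_media),
   ("documentation", documentation), ("other", other)]

-- ===== PRECONDITION & SPEC =====
def Spec_categorize_links (links : List String) (out : List (String × List String)) : Prop := out = categorize_links_alt links
instance (links : List String) (out : List (String × List String)) : Decidable (Spec_categorize_links links out) := by unfold Spec_categorize_links; infer_instance

-- ===== CLAIM (what is proved, stated in full; the proofs are below) =====
def Claim_equal_categorize_links : Prop := ∀ (links : List String), Dom_categorize_links links → Spec_categorize_links links (categorize_links links)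

-- ===== LEMMAS AND PROOFS =====

-- the four-bucket dict A's loop maintains, with arbitrary bucket contents
def pvMk (y s d o : List String) : PySem.Dict String (List String) :=
  ((((PySem.Dict.empty).insert "youtube" y).insert "social_media" s).insert
      "documentation" d).insert "other" o

theorem pvMk_items (y s d o : List String) :
    (pvMk y s d o).items =
      [("youtube", y), ("social_media", s), ("documentation", d), ("other", o)] := rfl

-- de Morgan bridges between A's disjunctive tests and B's negated filter predicates
theorem pvNotYt (x : String) :
    (!PySem.Str.isIn "youtube.com" x && !PySem.Str.isIn "youtu.be" x)
      = !(PySem.Str.isIn "youtube.com" x || PySem.Str.isIn "youtu.be" x) := by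
  simp [-PySem.Str.isIn_eq]

theorem pvNotSm (x : String) :
    (!PySem.Str.isIn "instagram.com" x && (!PySem.Str.isIn "facebook.com" x &&
      (!PySem.Str.isIn "twitter.com" x && !PySem.Str.isIn "tiktok.com" x)))
      = !(PySem.Str.isIn "instagram.com" x || (PySem.Str.isIn "facebook.com" x ||
      (PySem.Str.isIn "twitter.com" x || PySem.Str.isIn "tiktok.com" x))) := by
  simp [-PySem.Str.isIn_eq]

theorem pvNotDoc (x : String) :
    (!PySem.Str.isIn "github.com" x && (!PySem.Str.isIn "docs." x && !PySem.Str.isIn "documentation" x))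
      = !(PySem.Str.isIn "github.com" x || (PySem.Str.isIn "docs." x || PySem.Str.isIn "documentation" x)) := by
  simp [-PySem.Str.isIn_eq]

-- invariant: A's loop over the four-bucket dict appends exactly B's staged filters
theorem pvLoop (links y s d o : List String) :
    (links.foldl (fun d link =>
      if PySem.Str.isIn "youtube.com" link || PySem.Str.isIn "youtu.be" link then
        d.modify "youtube" [] (fun l => l ++ [link])
      else if ["instagram.com", "facebook.com", "twitter.com", "tiktok.com"].any
          (fun site => PySem.Str.isIn site link) then
        d.modify "social_media" [] (fun l => l ++ [link])
      else if ["github.com", "docs.", "documentation"].any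
          (fun site => PySem.Str.isIn site link) then
        d.modify "documentation" [] (fun l => l ++ [link])
      else
        d.modify "other" [] (fun l => l ++ [link])) (pvMk y s d o))
    = pvMk
        (y ++ links.filter (fun l => pvHit l ["youtube.com", "youtu.be"]))
        (s ++ (links.filter (fun l => !pvHit l ["youtube.com", "youtu.be"])).filter
              (fun l => pvHit l ["instagram.com", "facebook.com", "twitter.com", "tiktok.com"]))
        (d ++ ((links.filter (fun l => !pvHit l ["youtube.com", "youtu.be"])).filter
              (fun l => !pvHit l ["instagram.com", "facebook.com", "twitter.com", "tiktok.com"])).filter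
              (fun l => pvHit l ["github.com", "docs.", "documentation"]))
        (o ++ ((links.filter (fun l => !pvHit l ["youtube.com", "youtu.be"])).filter
              (fun l => !pvHit l ["instagram.com", "facebook.com", "twitter.com", "tiktok.com"])).filter
              (fun l => !pvHit l ["github.com", "docs.", "documentation"])) := by
  induction links generalizing y s d o with
  | nil => simp
  | cons x xs ih =>
    simp only [List.foldl_cons, List.filter_cons]
    cases hy : (PySem.Str.isIn "youtube.com" x || PySem.Str.isIn "youtu.be" x)
    case true =>
      have hm : (pvMk y s d o).modify "youtube" [] (fun l => l ++ [x]) = pvMk (y ++ [x]) s d o := rfl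
      simpa [pvHit, hy, hm, -PySem.Str.isIn_eq] using ih (y ++ [x]) s d o
    case false =>
      cases hs : (PySem.Str.isIn "instagram.com" x || (PySem.Str.isIn "facebook.com" x ||
          (PySem.Str.isIn "twitter.com" x || PySem.Str.isIn "tiktok.com" x)))
      case true =>
        have hm : (pvMk y s d o).modify "social_media" [] (fun l => l ++ [x]) = pvMk y (s ++ [x]) d o := rfl
        have hy' : (!PySem.Str.isIn "youtube.com" x && !PySem.Str.isIn "youtu.be" x) = true := by
          rw [pvNotYt, hy]; rfl
        have hs' : (!PySem.Str.isIn "instagram.com" x && (!PySem.Str.isIn "facebook.com" x &&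
            (!PySem.Str.isIn "twitter.com" x && !PySem.Str.isIn "tiktok.com" x))) = false := by
          rw [pvNotSm, hs]; rfl
        simpa [pvHit, hy, hs, hy', hs', hm, -PySem.Str.isIn_eq] using ih y (s ++ [x]) d o
      case false =>
        cases hd : (PySem.Str.isIn "github.com" x || (PySem.Str.isIn "docs." x ||
            PySem.Str.isIn "documentation" x))
        case true =>
          have hm : (pvMk y s d o).modify "documentation" [] (fun l => l ++ [x]) = pvMk y s (d ++ [x]) o := rfl
          have hy' : (!PySem.Str.isIn "youtube.com" x && !PySem.Str.isIn "youtu.be" x) = true := by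
            rw [pvNotYt, hy]; rfl
          have hs' : (!PySem.Str.isIn "instagram.com" x && (!PySem.Str.isIn "facebook.com" x &&
              (!PySem.Str.isIn "twitter.com" x && !PySem.Str.isIn "tiktok.com" x))) = true := by
            rw [pvNotSm, hs]; rfl
          have hd' : (!PySem.Str.isIn "github.com" x && (!PySem.Str.isIn "docs." x &&
              !PySem.Str.isIn "documentation" x)) = false := by
            rw [pvNotDoc, hd]; rfl
          simpa [pvHit, hy, hs, hd, hy', hs', hd', hm, -PySem.Str.isIn_eq] using ih y s (d ++ [x]) o
        case false =>
          have hm : (pvMk y s d o).modify "other" [] (fun l => l ++ [x]) = pvMk y s d (o ++ [x]) := rfl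
          have hy' : (!PySem.Str.isIn "youtube.com" x && !PySem.Str.isIn "youtu.be" x) = true := by
            rw [pvNotYt, hy]; rfl
          have hs' : (!PySem.Str.isIn "instagram.com" x && (!PySem.Str.isIn "facebook.com" x &&
              (!PySem.Str.isIn "twitter.com" x && !PySem.Str.isIn "tiktok.com" x))) = true := by
            rw [pvNotSm, hs]; rfl
          have hd' : (!PySem.Str.isIn "github.com" x && (!PySem.Str.isIn "docs." x &&
              !PySem.Str.isIn "documentation" x)) = true := by
            rw [pvNotDoc, hd]; rfl
          simpa [pvHit, hy, hs, hd, hy', hs', hd', hm, -PySem.Str.isIn_eq] using ih y s d (o ++ [x])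

-- ===== VERDICT (by name: the statement is the Claim_ definition above) =====
theorem categorize_links_spec : Claim_equal_categorize_links := by
  intro links _
  unfold Spec_categorize_links categorize_links categorize_links_alt
  have h0 : ((((PySem.Dict.empty).insert "youtube" ([] : List String)).insert "social_media" []).insert
      "documentation" []).insert "other" [] = pvMk [] [] [] [] := rfl
  simp only [h0, pvLoop, pvMk_items, List.nil_append]
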